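-- pv_equiv track=rewrite | github.com/2awesome-rob/iron_fungi | my_kaggle_functions.py | _clean_feature_names
-- ===== SOURCE A (Python) =====
-- from typing import List, Dict, Optional, Tuple, Union
--
-- def _clean_feature_names(features: List[str]) -> Tuple[List[str], Dict[str, str]]:
--     """helper function to clean feature names"""
--     clean_map = {col: col.casefold().strip().
--                  replace(" ","_").
--                  replace("(","_").
--                  replace(")","").
--                  replace("-","_").
--                  replace(",","_").
--                  replace(".","_") for col in features}
--     return [clean_map[col] for col in features], clean_map
-- ===== SOURCE B (Python) =====
-- def _clean_feature_names(features):
--     """helper function to clean feature names: single character pass instead of six replace passes"""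
--     def _clean(col):
--         out = []
--         for ch in col.casefold().strip():
--             if ch in " (-,.":
--                 out.append("_")
--             elif ch != ")":
--                 out.append(ch)
--         return "".join(out)
--     cleaned = [_clean(col) for col in features]
--     return cleaned, dict(zip(features, cleaned))
-- ===== Notes on version B (the rewrite author's own statement) =====
-- stated objective: alternative
-- what changed: B replaces A's six sequential str.replace passes (plus a dict re-lookup pass to build the list) with a single character-by-character pass per name, and builds the map once from the already-cleaned list via dict(zip(...)).
import Mathlib
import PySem

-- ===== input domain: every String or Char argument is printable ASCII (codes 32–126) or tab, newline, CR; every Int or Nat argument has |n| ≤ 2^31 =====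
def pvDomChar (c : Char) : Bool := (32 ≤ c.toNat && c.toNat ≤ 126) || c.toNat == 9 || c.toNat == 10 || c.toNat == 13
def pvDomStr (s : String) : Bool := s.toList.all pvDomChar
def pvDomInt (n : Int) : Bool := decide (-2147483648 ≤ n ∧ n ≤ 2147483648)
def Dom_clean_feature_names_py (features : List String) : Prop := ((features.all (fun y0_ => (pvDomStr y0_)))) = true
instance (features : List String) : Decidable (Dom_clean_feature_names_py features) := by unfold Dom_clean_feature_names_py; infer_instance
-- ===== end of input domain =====

-- B cleans each name in one character-by-character pass (and builds the map from the cleaned list) instead of A's six sequential replace passes plus a dict re-lookup pass; alternative structure, same cost.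



-- ===== PORT A =====
-- A's `casefold()` is ported as PySem.Str.lower: on the printable-ASCII domain (Dom_) casefold and lower coincide.
def pvCleanA (col : String) : String :=
  PySem.Str.replace (PySem.Str.replace (PySem.Str.replace (PySem.Str.replace (PySem.Str.replace (PySem.Str.replace
    (PySem.Str.strip (PySem.Str.lower col)) " " "_") "(" "_") ")" "") "-" "_") "," "_") "." "_"

-- clean_map[col]: col is always a key of clean_map (it was inserted for every element of features),
-- so the KeyError branch (get? = none) is unreachable; getD "" transliterates the lookup.
def clean_feature_names_py (features : List String) : List String × (List (String × String)) :=
  let clean_map : PySem.Dict String String :=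
    features.foldl (fun d col => d.insert col (pvCleanA col)) PySem.Dict.empty
  (features.map (fun col => (clean_map.get? col).getD ""), clean_map.items)

-- ===== PORT B =====
-- B's `casefold()` is ported as PySem.Str.lower, exactly as in A's port (identical on Dom_).
-- the character loop of B's _clean: `ch in " (-,."` is a single-character membership test
def pvCleanBChars : List Char → List Char
  | [] => []
  | c :: t =>
    if [' ', '(', '-', ',', '.'].contains c then '_' :: pvCleanBChars t
    else if c ≠ ')' then c :: pvCleanBChars t
    else pvCleanBChars t

def pvCleanB (col : String) : String :=
  String.ofList (pvCleanBChars (PySem.Chars.strip (PySem.Chars.lower col.toList)))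

def clean_feature_names_py_alt (features : List String) : List String × (List (String × String)) :=
  let cleaned := features.map pvCleanB
  (cleaned,
   ((features.zip cleaned).foldl (fun d p => d.insert p.1 p.2) PySem.Dict.empty).items)

-- ===== PRECONDITION & SPEC =====
def Spec_clean_feature_names_py (features : List String) (out : List String × (List (String × String))) : Prop := out = clean_feature_names_py_alt features
instance (features : List String) (out : List String × (List (String × String))) : Decidable (Spec_clean_feature_names_py features out) := by unfold Spec_clean_feature_names_py; infer_instance

-- ===== CLAIM (what is proved, stated in full; the proofs are below) =====
def Claim_equal_clean_feature_names_py : Prop := ∀ (features : List String), Dom_clean_feature_names_py features → Spec_clean_feature_names_py features (clean_feature_names_py features)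

-- ===== LEMMAS AND PROOFS =====


-- the replacement done by one single-character replace pass, as a flatMap
def pvRep1 (o : Char) (n : List Char) (c : Char) : List Char := if c = o then n else [c]

lemma pvGoSingle (o : Char) (n : List Char) :
    ∀ (l acc : List Char) (fuel : Nat), l.length ≤ fuel →
      PySem.Chars.replace.go [o] n fuel l acc = acc.reverse ++ l.flatMap (pvRep1 o n) := by
  intro l
  induction l with
  | nil =>
    intro acc fuel _
    cases fuel <;> simp [PySem.Chars.replace.go]
  | cons c t ih =>
    intro acc fuel h
    cases fuel with
    | zero => simp at h
    | succ f =>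
      simp only [PySem.Chars.replace.go, List.isPrefixOf, Bool.and_true]
      by_cases hc : o = c
      · subst hc
        simp only [BEq.rfl, if_true, List.length_cons, List.length_nil, Nat.zero_add,
          List.drop_succ_cons, List.drop_zero]
        rw [ih (n.reverse ++ acc) f (by simpa using h)]
        simp [pvRep1]
      · have hb : (o == c) = false := by simpa using hc
        simp only [hb, Bool.false_eq_true, if_false]
        rw [ih (c :: acc) f (by simpa using h)]
        simp [pvRep1, Ne.symm hc]

lemma pvReplaceSingle (s : List Char) (o : Char) (n : List Char) :
    PySem.Chars.replace s [o] n = s.flatMap (pvRep1 o n) := by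
  rw [PySem.Chars.replace]
  simp only [List.isEmpty_cons, Bool.false_eq_true, if_false]
  rw [pvGoSingle o n s [] s.length (le_refl _)]
  simp

-- the six single-character replace passes of A collapse to B's one pass
lemma pvChainEqClean (u : List Char) :
    ((((((u.flatMap (pvRep1 ' ' ['_'])).flatMap (pvRep1 '(' ['_'])).flatMap
        (pvRep1 ')' [])).flatMap (pvRep1 '-' ['_'])).flatMap (pvRep1 ',' ['_'])).flatMap
        (pvRep1 '.' ['_'])) = pvCleanBChars u := by
  induction u with
  | nil => simp [pvCleanBChars]
  | cons c t ih =>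
    simp only [List.flatMap_cons, List.flatMap_append]
    rw [ih]
    by_cases h1 : c = ' '
    · subst h1; simp [pvRep1, pvCleanBChars]
    · by_cases h2 : c = '('
      · subst h2; simp [pvRep1, pvCleanBChars]
      · by_cases h3 : c = ')'
        · subst h3; simp [pvRep1, pvCleanBChars]
        · by_cases h4 : c = '-'
          · subst h4; simp [pvRep1, pvCleanBChars]
          · by_cases h5 : c = ','
            · subst h5; simp [pvRep1, pvCleanBChars]
            · by_cases h6 : c = '.'
              · subst h6; simp [pvRep1, pvCleanBChars]
              · simp [pvRep1, pvCleanBChars, h1, h2, h3, h4, h5, h6]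

-- the cleaned name is the same under both algorithms (for every string)
lemma pvCleanEq (col : String) : pvCleanA col = pvCleanB col := by
  unfold pvCleanA pvCleanB
  apply String.toList_injective
  simp only [PySem.Str.toList_replace, PySem.Str.toList_strip, PySem.Str.toList_lower]
  have e1 : " ".toList = [' '] := rfl
  have e2 : "(".toList = ['('] := rfl
  have e3 : ")".toList = [')'] := rfl
  have e4 : "-".toList = ['-'] := rfl
  have e5 : ",".toList = [','] := rfl
  have e6 : ".".toList = ['.'] := rfl
  have e7 : "_".toList = ['_'] := rfl
  have e8 : "".toList = [] := rfl
  simp only [e1, e2, e3, e4, e5, e6, e7, e8, pvReplaceSingle]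
  rw [pvChainEqClean]
  simp [String.toList_ofList]

-- lookup in a fold of inserts whose value is a function of the key
lemma pvGetFoldlInsert (f : String → String) (x : String) :
    ∀ (l : List String) (d : PySem.Dict String String),
      (l.foldl (fun d c => d.insert c (f c)) d).get? x =
        if x ∈ l then some (f x) else d.get? x := by
  intro l
  induction l with
  | nil => intro d; simp
  | cons c t ih =>
    intro d
    simp only [List.foldl_cons, ih, List.mem_cons]
    by_cases hx : x ∈ t
    · simp [hx]
    · by_cases hc : x = c
      · subst hc; simp [hx, PySem.Dict.get?_insert_self]
      · simp [hx, hc, PySem.Dict.get?_insert_of_ne _ _ hc]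

-- ===== VERDICT (by name: the statement is the Claim_ definition above) =====
theorem clean_feature_names_py_spec : Claim_equal_clean_feature_names_py := by
  intro features _
  unfold Spec_clean_feature_names_py clean_feature_names_py clean_feature_names_py_alt
  have hzip : features.zip (features.map pvCleanB) =
      features.map (fun x => (x, pvCleanB x)) :=
    Eq.symm List.map_prod_left_eq_zip
  refine Prod.ext ?_ ?_
  · apply List.map_congr_left
    intro col hcol
    rw [pvGetFoldlInsert pvCleanA col features PySem.Dict.empty]
    simp [hcol, pvCleanEq]
  · simp only [hzip, List.foldl_map, pvCleanEq]
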